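-- pv_equiv track=rewrite | github.com/aniruddhasm/programming | python/facing_the_sun.py | countBuildings
-- ===== SOURCE A (Python) =====
-- def countBuildings(h, n):
--     # code here
--     count = 1
--     m = h[0]
--     for i in h:
--         if i > m:
--             m = i
--             count += 1
--
--     return count
-- ===== SOURCE B (Python) =====
-- def countBuildings(h, n):
--     # count distinct prefix maxima: the running-max sequence is
--     # non-decreasing, so its number of distinct values equals the
--     # number of times a new maximum appears (n is unused, as in A)
--     return len({max(h[:i + 1]) for i in range(len(h))})
-- ===== Notes on version B (the rewrite author's own statement) =====
-- stated objective: alternative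
-- what changed: Instead of a single running-max loop with a counter, B forms the set of prefix maxima (max of each prefix slice) and returns its cardinality; since the prefix-max sequence is monotone its distinct-value count equals A's count of new maxima.
-- crash fix: On an empty list A raises IndexError (h[0]); B returns 0, the count of buildings seeing the sun. — e.g. on countBuildings([], 0): A raises IndexError, B returns 0
import Mathlib
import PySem

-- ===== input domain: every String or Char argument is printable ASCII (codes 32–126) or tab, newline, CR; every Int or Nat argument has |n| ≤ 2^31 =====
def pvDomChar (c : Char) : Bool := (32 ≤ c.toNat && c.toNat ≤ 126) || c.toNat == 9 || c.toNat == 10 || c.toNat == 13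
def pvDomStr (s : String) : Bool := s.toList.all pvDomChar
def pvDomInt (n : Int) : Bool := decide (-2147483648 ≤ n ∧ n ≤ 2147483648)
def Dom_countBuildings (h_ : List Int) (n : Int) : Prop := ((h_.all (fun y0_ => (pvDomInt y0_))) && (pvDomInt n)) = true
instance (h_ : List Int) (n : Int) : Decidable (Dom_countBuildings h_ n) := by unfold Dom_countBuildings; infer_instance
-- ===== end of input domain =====

-- B counts the buildings as the cardinality of the set of prefix maxima instead of a running-max counter loop (alternative decomposition, same result).


-- ===== PORT A =====
def countBuildings (h_ : List Int) (n : Int) : Int :=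
  match PySem.List.pyGet? h_ 0 with
  | none => 0  -- h[0] raises IndexError here; excluded by Pre_
  | some m0 =>
      (h_.foldl (fun cm i => if i > cm.2 then (cm.1 + 1, i) else cm) ((1 : Int), m0)).1

-- ===== PORT B =====
def countBuildings_alt (h_ : List Int) (n : Int) : Int :=
  PySem.Set.len (PySem.Set.ofList
    ((PySem.List.pyRange 0 (h_.length : Int)).map
      (fun i => (PySem.List.max? (PySem.List.slice h_ (some 0) (some (i + 1))) (fun x => x)).getD 0)))

-- ===== PRECONDITION & SPEC =====
-- Pre_ excludes only the empty list, on which Python A raises IndexError at h[0].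
def Pre_countBuildings (h_ : List Int) (n : Int) : Prop := h_ ≠ []
instance (h_ : List Int) (n : Int) : Decidable (Pre_countBuildings h_ n) := by unfold Pre_countBuildings; infer_instance
def pvWitness_countBuildings : List Int × Int := ([3, 1, 4, 4, 2, 5], 6)

-- On the empty list A raises IndexError (h[0]); B returns 0, the count of buildings seeing the sun.
def Raises_countBuildings (h_ : List Int) (n : Int) : Prop := h_ = []
instance (h_ : List Int) (n : Int) : Decidable (Raises_countBuildings h_ n) := by unfold Raises_countBuildings; infer_instance
def pvRaiseWitness_countBuildings : List Int × Int := ([], 0)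
def pvRaiseWitnessOut_countBuildings : Int := 0

def Spec_countBuildings (h_ : List Int) (n : Int) (out : Int) : Prop := out = countBuildings_alt h_ n
instance (h_ : List Int) (n : Int) (out : Int) : Decidable (Spec_countBuildings h_ n out) := by unfold Spec_countBuildings; infer_instance

-- ===== CLAIM (what is proved, stated in full; the proofs are below) =====
def Claim_equal_countBuildings : Prop := ∀ (h_ : List Int) (n : Int), Dom_countBuildings h_ n → Pre_countBuildings h_ n → Spec_countBuildings h_ n (countBuildings h_ n)
def Claim_raises_countBuildings : Prop := (∀ (h_ : List Int) (n : Int), Dom_countBuildings h_ n → Raises_countBuildings h_ n → ¬ Pre_countBuildings h_ n) ∧ (Dom_countBuildings (pvRaiseWitness_countBuildings.1) (pvRaiseWitness_countBuildings.2) ∧ Raises_countBuildings (pvRaiseWitness_countBuildings.1) (pvRaiseWitness_countBuildings.2) ∧ countBuildings_alt (pvRaiseWitness_countBuildings.1) (pvRaiseWitness_countBuildings.2) = pvRaiseWitnessOut_countBuildings)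

-- ===== LEMMAS AND PROOFS =====

-- the sequence of prefix maxima of m :: t
def pvPms (m : Int) : List Int → List Int
  | [] => [m]
  | x :: t => m :: pvPms (max m x) t

-- number of strict increases of the running max over t starting from m
def pvCnt (m : Int) : List Int → Nat
  | [] => 0
  | x :: t => if m < x then 1 + pvCnt x t else pvCnt m t

-- A's loop returns its initial count plus the number of new maxima
lemma pvFoldA (t : List Int) : ∀ (c m : Int),
    (t.foldl (fun cm i => if i > cm.2 then (cm.1 + 1, i) else cm) (c, m)).1 = c + (pvCnt m t : Int) := by
  induction t with
  | nil => intro c m; simp [pvCnt]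
  | cons x t ih =>
      intro c m
      by_cases hx : m < x
      · simp [List.foldl_cons, pvCnt, hx, ih, gt_iff_lt]
        ring
      · simp [List.foldl_cons, pvCnt, hx, ih, gt_iff_lt]

-- B's mapped list of prefix maxima is pvPms
lemma pvMapPms (t : List Int) : ∀ (a : Int),
    (List.range (t.length + 1)).map (fun i => (t.take i).foldl max a) = pvPms a t := by
  induction t with
  | nil => intro a; simp [pvPms]
  | cons x t ih =>
      intro a
      rw [show (x :: t).length + 1 = (t.length + 1) + 1 from rfl, List.range_succ_eq_map]
      simp only [List.map_cons, List.map_map, pvPms]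
      refine congrArg₂ _ (by simp) ?_
      rw [← ih (max a x)]
      exact List.map_congr_left (fun i _ => by simp [Function.comp, List.take_succ_cons])

-- the distinct count of pvPms m t, folded from any set bounded by m
lemma pvSetLen (t : List Int) : ∀ (m : Int) (s : PySem.Set Int), (∀ y ∈ s, y ≤ m) →
    ((pvPms m t).foldl PySem.Set.add s).length
      = (if m ∈ s then s.length else s.length + 1) + pvCnt m t := by
  induction t with
  | nil =>
      intro m s hb
      by_cases hm : m ∈ s <;>
        simp [pvPms, pvCnt, PySem.Set.add, PySem.Set.contains, hm]
  | cons x t ih =>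
      intro m s hb
      have hadd : PySem.Set.add s m = if m ∈ s then s else s ++ [m] := by
        simp [PySem.Set.add, PySem.Set.contains]
      by_cases hx : m < x
      · have hmax : max m x = x := max_eq_right (le_of_lt hx)
        have hb' : ∀ y ∈ PySem.Set.add s m, y ≤ x := by
          intro y hy
          rw [hadd] at hy
          by_cases hm : m ∈ s <;> simp [hm] at hy
          · exact le_of_lt (lt_of_le_of_lt (hb y hy) hx)
          · rcases hy with hy | hy
            · exact le_of_lt (lt_of_le_of_lt (hb y hy) hx)
            · exact le_of_lt (hy ▸ hx)
        have hxnot : x ∉ PySem.Set.add s m := by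
          intro hxs
          rw [hadd] at hxs
          by_cases hm : m ∈ s <;> simp [hm] at hxs
          · exact absurd hx (not_lt.mpr (hb x hxs))
          · rcases hxs with hxs | hxs
            · exact absurd hx (not_lt.mpr (hb x hxs))
            · exact absurd (hxs ▸ hx) (lt_irrefl m)
        have hlen : (PySem.Set.add s m).length = if m ∈ s then s.length else s.length + 1 := by
          rw [hadd]; by_cases hm : m ∈ s <;> simp [hm]
        rw [pvPms, List.foldl_cons, hmax, ih x (PySem.Set.add s m) hb', if_neg hxnot, hlen,
          pvCnt, if_pos hx]
        omega
      · have hmax : max m x = m := max_eq_left (not_lt.mp hx)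
        have hb' : ∀ y ∈ PySem.Set.add s m, y ≤ m := by
          intro y hy
          rw [hadd] at hy
          by_cases hm : m ∈ s <;> simp [hm] at hy
          · exact hb y hy
          · rcases hy with hy | hy
            · exact hb y hy
            · exact le_of_eq hy
        have hmem : m ∈ PySem.Set.add s m := by
          rw [hadd]; by_cases hm : m ∈ s <;> simp [hm]
        have hlen : (PySem.Set.add s m).length = if m ∈ s then s.length else s.length + 1 := by
          rw [hadd]; by_cases hm : m ∈ s <;> simp [hm]
        rw [pvPms, List.foldl_cons, hmax, ih m (PySem.Set.add s m) hb', if_pos hmem, hlen,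
          pvCnt, if_neg hx]

-- B's mapped list, stated on the actual port term
lemma pvAltList (a : Int) (t : List Int) :
    ((PySem.List.pyRange 0 ((a :: t).length : Int)).map
      (fun i => (PySem.List.max? (PySem.List.slice (a :: t) (some 0) (some (i + 1))) (fun x => x)).getD 0))
    = pvPms a t := by
  rw [PySem.List.pyRange_zero_natCast, List.map_map, ← pvMapPms t a]
  refine List.map_congr_left (fun i _ => ?_)
  have hslice : PySem.List.slice (a :: t) (some 0) (some ((i : Int) + 1)) = a :: t.take i := by
    rw [PySem.List.slice_zero_start]
    have : ((i : Int) + 1) = ((i + 1 : Nat) : Int) := by push_cast; ring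
    rw [this, PySem.List.slice_to_natCast]
    simp [List.take_succ_cons]
  simp [Function.comp, hslice, PySem.List.max?_id_cons]

theorem pvMain (a : Int) (t : List Int) (n : Int) :
    countBuildings (a :: t) n = countBuildings_alt (a :: t) n := by
  have hA : countBuildings (a :: t) n = 1 + (pvCnt a t : Int) := by
    have hget : PySem.List.pyGet? (a :: t) 0 = some a := by
      simp [PySem.List.pyGet?, PySem.List.pyIdx?]
    simp only [countBuildings, hget, List.foldl_cons, gt_iff_lt, lt_irrefl, if_false]
    exact pvFoldA t 1 a
  have hB : countBuildings_alt (a :: t) n = 1 + (pvCnt a t : Int) := by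
    simp only [countBuildings_alt, pvAltList, PySem.Set.len, PySem.Set.ofList_eq_foldl]
    rw [pvSetLen t a [] (by simp)]
    simp
  rw [hA, hB]

-- ===== VERDICT (by name: the statement is the Claim_ definition above) =====
theorem countBuildings_spec : Claim_equal_countBuildings := by
  intro h_ n _ hpre
  cases h_ with
  | nil => exact absurd rfl hpre
  | cons a t => exact pvMain a t n

@[simp] theorem countBuildings_raises : Claim_raises_countBuildings := by
  unfold Claim_raises_countBuildings
  exact ⟨fun h_ n _ hr hpre => hpre hr, by decide⟩
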